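-- pv_equiv track=rewrite | github.com/Tripleler/CodeTest | Lv2/lv2_n^2 배열 자르기.py | solution
-- ===== SOURCE A (Python) =====
-- def solution(n, left, right):
--     answer = []
--     for i in range(left // n, right // n + 1):
--         for j in range(1, n + 1):
--             if i + 1 <= j:
--                 answer.append(j)
--             else:
--                 answer.append(i + 1)
--     if (right + 1) % n == 0:
--         answer = answer[left % n:]
--     else:
--         answer = answer[left % n:-(n - right % n - 1)]
--     return answer
-- ===== SOURCE B (Python) =====
-- def solution(n, left, right):
--     return [max(i // n, i % n) + 1 for i in range(left, right + 1)]
-- ===== Notes on version B (the rewrite author's own statement) =====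
-- stated objective: simpler
-- what changed: B maps a closed-form formula max(i//n, i%n)+1 directly over the flat index range [left, right], replacing A's construction of whole matrix rows followed by positive/negative slice trimming.
-- outside the precondition, e.g. on solution(-2, 0, 3): A returns [], B returns [1, 0, 1, 0]
import Mathlib
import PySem

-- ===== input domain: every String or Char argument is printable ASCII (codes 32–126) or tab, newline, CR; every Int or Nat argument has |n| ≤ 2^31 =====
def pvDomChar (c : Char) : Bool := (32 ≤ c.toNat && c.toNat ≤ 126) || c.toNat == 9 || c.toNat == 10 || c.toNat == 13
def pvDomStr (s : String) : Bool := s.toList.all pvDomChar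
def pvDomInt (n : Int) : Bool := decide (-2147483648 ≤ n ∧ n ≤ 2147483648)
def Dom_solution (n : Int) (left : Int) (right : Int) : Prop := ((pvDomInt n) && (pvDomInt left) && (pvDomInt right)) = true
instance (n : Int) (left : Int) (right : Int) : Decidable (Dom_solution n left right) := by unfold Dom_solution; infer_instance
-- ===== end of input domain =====

-- B maps the closed-form value max(i//n, i%n)+1 over the flat index range, replacing A's row building plus slice trimming (simpler).

-- ===== PORT A =====
def solution (n : Int) (left : Int) (right : Int) : List Int :=
  let answer : List Int :=
    (PySem.List.pyRange (PySem.Int.floordiv left n) (PySem.Int.floordiv right n + 1) 1).foldl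
      (fun acc i =>
        (PySem.List.pyRange 1 (n + 1) 1).foldl
          (fun acc2 j => if i + 1 ≤ j then acc2 ++ [j] else acc2 ++ [i + 1]) acc)
      []
  if PySem.Int.mod (right + 1) n == 0 then
    PySem.List.slice answer (some (PySem.Int.mod left n)) none
  else
    PySem.List.slice answer (some (PySem.Int.mod left n)) (some (-(n - PySem.Int.mod right n - 1)))

-- ===== PORT B =====
def solution_alt (n : Int) (left : Int) (right : Int) : List Int :=
  (PySem.List.pyRange left (right + 1) 1).map
    (fun i => max (PySem.Int.floordiv i n) (PySem.Int.mod i n) + 1)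

-- ===== PRECONDITION & SPEC =====
-- Pre_ excludes n = 0, where both programs raise ZeroDivisionError, and non-positive matrix
-- sizes n with a non-empty index range left ≤ right — outside the task's natural domain, and
-- there A's empty-rows-then-slice pipeline returns the accidental [].
def Pre_solution (n : Int) (left : Int) (right : Int) : Prop := 1 ≤ n ∨ (n ≤ -1 ∧ right < left)
instance (n : Int) (left : Int) (right : Int) : Decidable (Pre_solution n left right) := by unfold Pre_solution; infer_instance
def pvWitness_solution : Int × Int × Int := (3, 2, 5)
def Spec_solution (n : Int) (left : Int) (right : Int) (out : List Int) : Prop := out = solution_alt n left right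
instance (n : Int) (left : Int) (right : Int) (out : List Int) : Decidable (Spec_solution n left right out) := by unfold Spec_solution; infer_instance

-- ===== CLAIM (what is proved, stated in full; the proofs are below) =====
def Claim_equal_solution : Prop := ∀ (n : Int) (left : Int) (right : Int), Dom_solution n left right → Pre_solution n left right → Spec_solution n left right (solution n left right)

-- ===== LEMMAS AND PROOFS =====

-- one matrix row, rewritten as the closed-form value over its flat index block
lemma row_eq (n i : Int) (hn : 0 < n) :
    (PySem.List.pyRange 1 (n + 1) 1).map (fun j => if i + 1 ≤ j then j else i + 1)
      = (PySem.List.pyRange (i * n) (i * n + n) 1).map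
          (fun k => max (PySem.Int.floordiv k n) (PySem.Int.mod k n) + 1) := by
  rw [PySem.List.pyRange_one, PySem.List.pyRange_one]
  have h1 : (n + 1 - 1).toNat = n.toNat := by omega
  have h2 : (i * n + n - i * n).toNat = n.toNat := by omega
  rw [h1, h2, List.map_map, List.map_map]
  apply List.map_congr_left
  intro k hk
  rw [List.mem_range] at hk
  have hkn : (k : Int) < n := by omega
  have hfd : PySem.Int.floordiv (i * n + k) n = i := by
    rw [PySem.Int.floordiv_eq_iff_of_pos hn]
    constructor
    · omega
    · have : (i + 1) * n = i * n + n := by ring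
      omega
  have hmd : PySem.Int.mod (i * n + k) n = k := by
    have := PySem.Int.floordiv_mul_add_mod (i * n + k) n
    rw [hfd] at this
    omega
  simp only [Function.comp_apply, hfd, hmd]
  split_ifs <;> omega

-- concatenating the per-row blocks is one map over the flat range
lemma flat_eq (n : Int) (hn : 0 < n) (F : Int → Int) :
    ∀ (m : Nat) (a b : Int), (b - a).toNat = m →
      (PySem.List.pyRange a b 1).flatMap
          (fun i => (PySem.List.pyRange (i * n) (i * n + n) 1).map F)
        = (PySem.List.pyRange (a * n) (b * n) 1).map F := by
  intro m
  induction m with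
  | zero =>
    intro a b hm
    have hba : b ≤ a := by omega
    have h2 : b * n ≤ a * n := mul_le_mul_of_nonneg_right hba hn.le
    rw [PySem.List.pyRange_one_eq_nil hba, PySem.List.pyRange_one_eq_nil h2]
    simp
  | succ m ih =>
    intro a b hm
    have hab : a < b := by omega
    rw [PySem.List.pyRange_one_cons hab]
    have hsplit : PySem.List.pyRange (a * n) (b * n) 1
        = PySem.List.pyRange (a * n) (a * n + n) 1 ++ PySem.List.pyRange (a * n + n) (b * n) 1 := by
      apply PySem.List.pyRange_one_append
      · omega
      · have : (a + 1) * n ≤ b * n := mul_le_mul_of_nonneg_right (by omega) hn.le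
        nlinarith [this]
    rw [hsplit, List.flatMap_cons, List.map_append]
    congr 1
    have h1 : (a + 1) * n = a * n + n := by ring
    have := ih (a + 1) b (by omega)
    rw [h1] at this
    exact this

lemma drop_pyRange (s : Nat) : ∀ (a b : Int),
    (PySem.List.pyRange a b 1).drop s = PySem.List.pyRange (a + s) b 1 := by
  induction s with
  | zero => intro a b; simp
  | succ s ih =>
    intro a b
    by_cases h : a < b
    · rw [PySem.List.pyRange_one_cons h, List.drop_succ_cons, ih]
      congr 1
      push_cast
      ring
    · rw [PySem.List.pyRange_one_eq_nil (by omega), PySem.List.pyRange_one_eq_nil (by omega), List.drop_nil]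

lemma take_pyRange (t : Nat) : ∀ (a b : Int), a + t ≤ b →
    (PySem.List.pyRange a b 1).take t = PySem.List.pyRange a (a + t) 1 := by
  induction t with
  | zero => intro a b _; simp [PySem.List.pyRange_one_eq_nil]
  | succ t ih =>
    intro a b h
    have hab : a < b := by omega
    rw [PySem.List.pyRange_one_cons hab, List.take_succ_cons, ih (a + 1) b (by push_cast at h ⊢; omega),
      PySem.List.pyRange_one_cons (show a < a + (t + 1 : Nat) by push_cast; omega)]
    congr 2
    push_cast
    ring

-- xs[a:-k] for 0 ≤ a, 0 < k, as take/drop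
lemma slice_nonneg_negend (xs : List Int) (a : Int) (ha : 0 ≤ a) (k : Nat) (hk : 0 < k) :
    PySem.List.slice xs (some a) (some (-(k : Int))) = (xs.take (xs.length - k)).drop a.toNat := by
  simp only [PySem.List.slice, PySem.List.clampIdx]
  rw [if_neg (by omega : ¬ a < 0), if_pos (by omega : -(k : Int) < 0)]
  by_cases hlen : (xs.length : Int) + -(k : Int) < 0
  · rw [if_pos hlen]
    have h0 : xs.length - k = 0 := by omega
    simp [h0]
  · rw [if_neg hlen]
    have hcb : ((xs.length : Int) + -(k : Int)).toNat = xs.length - k := by omega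
    rw [hcb]
    by_cases hale : a.toNat ≤ xs.length
    · rw [min_eq_left hale, List.drop_take]
    · have h1 : min a.toNat xs.length = xs.length := by omega
      rw [h1]
      rw [List.drop_eq_nil_of_le (le_refl _), List.take_nil,
        List.drop_eq_nil_of_le (by simp; omega)]

theorem solution_eq_alt (n l r : Int) (hn : 1 ≤ n) : solution n l r = solution_alt n l r := by
  have hn0 : 0 < n := hn
  have hlsum : PySem.Int.floordiv l n * n + PySem.Int.mod l n = l :=
    PySem.Int.floordiv_mul_add_mod l n
  have hrsum : PySem.Int.floordiv r n * n + PySem.Int.mod r n = r :=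
    PySem.Int.floordiv_mul_add_mod r n
  have hlm0 : 0 ≤ PySem.Int.mod l n := by
    rw [PySem.Int.mod_eq_emod_of_pos hn0]; exact Int.emod_nonneg l (by omega)
  have hlm1 : PySem.Int.mod l n < n := by
    rw [PySem.Int.mod_eq_emod_of_pos hn0]; exact Int.emod_lt_of_pos l hn0
  have hrm0 : 0 ≤ PySem.Int.mod r n := by
    rw [PySem.Int.mod_eq_emod_of_pos hn0]; exact Int.emod_nonneg r (by omega)
  have hrm1 : PySem.Int.mod r n < n := by
    rw [PySem.Int.mod_eq_emod_of_pos hn0]; exact Int.emod_lt_of_pos r hn0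
  set L := PySem.Int.floordiv l n with hL
  set R := PySem.Int.floordiv r n with hR
  set lm := PySem.Int.mod l n with hlm
  set rm := PySem.Int.mod r n with hrm
  set G : Int → Int := fun k => max (PySem.Int.floordiv k n) (PySem.Int.mod k n) + 1 with hG
  have hanswer :
      (PySem.List.pyRange L (R + 1) 1).foldl
        (fun acc i =>
          (PySem.List.pyRange 1 (n + 1) 1).foldl
            (fun acc2 j => if i + 1 ≤ j then acc2 ++ [j] else acc2 ++ [i + 1]) acc) []
      = (PySem.List.pyRange (L * n) ((R + 1) * n) 1).map G := by
    have hfun : (fun (acc : List Int) (i : Int) =>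
        (PySem.List.pyRange 1 (n + 1) 1).foldl
          (fun acc2 j => if i + 1 ≤ j then acc2 ++ [j] else acc2 ++ [i + 1]) acc)
        = (fun acc i => acc ++ (PySem.List.pyRange (i * n) (i * n + n) 1).map G) := by
      funext acc i
      have hb : (fun (acc2 : List Int) (j : Int) => if i + 1 ≤ j then acc2 ++ [j] else acc2 ++ [i + 1])
          = (fun acc2 j => acc2 ++ [if i + 1 ≤ j then j else i + 1]) := by
        funext acc2 j; split_ifs <;> rfl
      rw [hb, PySem.List.foldl_append_singleton_eq_map, row_eq n i hn0]
    rw [hfun, PySem.List.foldl_append_eq_flatMap, List.nil_append,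
      flat_eq n hn0 G ((R + 1) - L).toNat L (R + 1) rfl]
  show (if PySem.Int.mod (r + 1) n == 0 then _ else _) = _
  by_cases hc : rm = n - 1
  · -- right ends a row: r + 1 = (R + 1) * n, only the front is trimmed
    have hr1 : r + 1 = (R + 1) * n := by
      have : (R + 1) * n = R * n + n := by ring
      omega
    have hmz : PySem.Int.mod (r + 1) n = 0 := by
      rw [PySem.Int.mod_eq_emod_of_pos hn0, hr1]
      exact Int.mul_emod_left _ _
    rw [if_pos (by rw [hmz]; rfl)]
    rw [hanswer, PySem.List.slice_from _ hlm0, List.map_drop.symm, drop_pyRange]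
    have h1 : L * n + (lm.toNat : Int) = l := by omega
    have h2 : (R + 1) * n = r + 1 := hr1.symm
    rw [h1, h2, solution_alt, hG]
  · -- right stops mid-row: n - rm - 1 cells are trimmed off the back
    have hrmlt : rm < n - 1 := by omega
    have hmnz : PySem.Int.mod (r + 1) n = rm + 1 := by
      rw [PySem.Int.mod_eq_emod_of_pos hn0]
      have h3 : r + 1 = (rm + 1) + n * R := by have := mul_comm n R; omega
      rw [h3, Int.add_mul_emod_self_left]
      exact Int.emod_eq_of_lt (by omega) (by omega)
    rw [if_neg (by rw [hmnz]; simp; omega)]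
    set k : Nat := (n - rm - 1).toNat with hk
    have hkpos : 0 < k := by omega
    have hkcast : -(n - rm - 1) = -(k : Int) := by omega
    rw [hkcast, hanswer, slice_nonneg_negend _ _ hlm0 _ hkpos]
    by_cases hLR : R + 1 ≤ L
    · -- nothing was built, and left > right: both sides are empty
      have hnil : PySem.List.pyRange (L * n) ((R + 1) * n) 1 = [] :=
        PySem.List.pyRange_one_eq_nil (mul_le_mul_of_nonneg_right (by omega) hn0.le)
      have hnil2 : PySem.List.pyRange l (r + 1) 1 = [] := by
        apply PySem.List.pyRange_one_eq_nil
        have h5 : (R + 1) * n = R * n + n := by ring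
        have h6 : (R + 1) * n ≤ L * n := mul_le_mul_of_nonneg_right (by omega) hn0.le
        omega
      rw [hnil, solution_alt, hnil2]
      simp
    · have hPQ : L * n ≤ R * n := mul_le_mul_of_nonneg_right (by omega) hn0.le
      have hRn : (R + 1) * n = R * n + n := by ring
      have hlen : ((PySem.List.pyRange (L * n) ((R + 1) * n) 1).map G).length
          = ((R + 1) * n - L * n).toNat := by
        rw [List.length_map, PySem.List.length_pyRange_one]
      have hcast : ((((R + 1) * n - L * n).toNat - k : Nat) : Int) = r + 1 - L * n := by
        omega
      rw [hlen, ← List.map_take, ← List.map_drop,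
        take_pyRange _ _ _ (by omega),
        drop_pyRange]
      have h1 : L * n + ((((R + 1) * n - L * n).toNat - k : Nat) : Int) = r + 1 := by omega
      have h2 : L * n + ((lm.toNat : Nat) : Int) = l := by omega
      rw [h2, h1, solution_alt, hG]

lemma slice_nil (a? b? : Option Int) : PySem.List.slice ([] : List Int) a? b? = [] := by
  cases a? <;> cases b? <;> simp [PySem.List.slice, PySem.List.clampIdx]

lemma foldl_const {α β : Type} : ∀ (xs : List β) (acc : α), xs.foldl (fun a _ => a) acc = acc := by
  intro xs
  induction xs with
  | nil => intro acc; rfl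
  | cons x xs ih => intro acc; exact ih acc

-- ===== VERDICT (by name: the statement is the Claim_ definition above) =====
theorem solution_spec : Claim_equal_solution := by
  intro n l r _ hpre
  unfold Spec_solution
  rcases hpre with h | ⟨hneg, hrl⟩
  · exact solution_eq_alt n l r h
  · -- n ≤ -1 and right < left: every row is empty and the requested range is empty
    have hB : solution_alt n l r = [] := by
      rw [solution_alt, PySem.List.pyRange_one_eq_nil (by omega)]
      rfl
    have hinner : PySem.List.pyRange 1 (n + 1) 1 = [] :=
      PySem.List.pyRange_one_eq_nil (by omega)
    rw [hB]
    show (if PySem.Int.mod (r + 1) n == 0 then _ else _) = ([] : List Int)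
    rw [hinner]
    simp only [List.foldl_nil, foldl_const]
    split_ifs <;> exact slice_nil _ _
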